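-- pv_equiv track=rewrite | github.com/Kattusite/linguistics-db | app/app/lingdb.py | csvPhonemesToBitstring
-- ===== SOURCE A (Python) =====
-- INNER_DELIMITER = ";"  # delimits lists within a column
--
-- PHONEME_DELIMITER = "/" # Used on either side of a phoneme (e.g. /d/ --> d)
--
-- def csvPhonemesToBitstring(csvStr, phonemeList):
--     csvStr = csvStr.replace(PHONEME_DELIMITER, "")
--     csvList = csvStr.split(INNER_DELIMITER)
--     bitList = []
--
--     # Iterate over canonical list and match against csvList
--     for phoneme in phonemeList:
--         if phoneme in csvList:
--             bitList.append("1")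
--         else:
--             bitList.append("0")
--
--     # Construct string from list of matches
--     return "".join(bitList)
-- ===== SOURCE B (Python) =====
-- INNER_DELIMITER = ";"  # delimits lists within a column
--
-- PHONEME_DELIMITER = "/" # Used on either side of a phoneme (e.g. /d/ --> d)
--
-- def csvPhonemesToBitstring(csvStr, phonemeList):
--     # Drive the work from the distinct CSV tokens: for each token present,
--     # mark every position of phonemeList holding it in a mutable bit array.
--     tokens = set(csvStr.replace(PHONEME_DELIMITER, "").split(INNER_DELIMITER))
--     bits = ["0"] * len(phonemeList)
--     for t in tokens:
--         for i, p in enumerate(phonemeList):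
--             if p == t:
--                 bits[i] = "1"
--     return "".join(bits)
-- ===== Notes on version B (the rewrite author's own statement) =====
-- stated objective: alternative
-- what changed: B inverts A's loop structure: it builds the set of distinct CSV tokens once, starts from an all-'0' bit array, and for each distinct token marks every position of phonemeList holding it, instead of probing the token list once per phoneme.
import Mathlib
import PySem

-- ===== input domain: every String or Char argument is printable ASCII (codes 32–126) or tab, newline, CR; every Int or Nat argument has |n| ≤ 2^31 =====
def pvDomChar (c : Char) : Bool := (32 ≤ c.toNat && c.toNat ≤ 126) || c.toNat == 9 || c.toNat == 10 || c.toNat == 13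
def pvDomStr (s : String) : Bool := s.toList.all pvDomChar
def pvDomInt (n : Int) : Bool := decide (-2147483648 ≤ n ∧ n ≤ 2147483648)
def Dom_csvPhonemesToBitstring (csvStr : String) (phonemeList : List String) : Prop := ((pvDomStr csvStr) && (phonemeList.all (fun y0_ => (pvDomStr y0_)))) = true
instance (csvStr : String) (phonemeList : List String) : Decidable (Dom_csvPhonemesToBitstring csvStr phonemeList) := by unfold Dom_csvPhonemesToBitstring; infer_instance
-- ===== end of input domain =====

-- B inverts A's loop: instead of probing the token list once per phoneme, it walks the
-- distinct CSV tokens and marks each token's positions in a mutable bit array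
-- (objective: alternative decomposition).

-- ===== PORT A =====
def csvPhonemesToBitstring (csvStr : String) (phonemeList : List String) : String :=
  let csvStr' := PySem.Str.replace csvStr "/" ""
  -- the separator ";" is nonempty, so split? is exact (never none)
  let csvList := (PySem.Str.split? csvStr' ";").getD []
  let bitList := phonemeList.foldl
    (fun bitList phoneme => bitList ++ [if csvList.contains phoneme then "1" else "0"]) []
  PySem.Str.join "" bitList

-- ===== PORT B =====
def csvPhonemesToBitstring_alt (csvStr : String) (phonemeList : List String) : String :=
  let tokens : PySem.Set String :=
    PySem.Set.ofList ((PySem.Str.split? (PySem.Str.replace csvStr "/" "") ";").getD [])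
  let bits0 := List.replicate phonemeList.length "0"
  -- iterating the Set's elements is sound: marking "1"s is order-independent
  let bits := tokens.foldl (fun bs t =>
      (PySem.List.enumerate phonemeList 0).foldl
        (fun bs ip => if ip.2 == t then PySem.List.pySetD bs ip.1 "1" else bs) bs) bits0
  PySem.Str.join "" bits

-- ===== PRECONDITION & SPEC =====
def Spec_csvPhonemesToBitstring (csvStr : String) (phonemeList : List String) (out : String) : Prop := out = csvPhonemesToBitstring_alt csvStr phonemeList
instance (csvStr : String) (phonemeList : List String) (out : String) : Decidable (Spec_csvPhonemesToBitstring csvStr phonemeList out) := by unfold Spec_csvPhonemesToBitstring; infer_instance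

-- ===== CLAIM (what is proved, stated in full; the proofs are below) =====
def Claim_equal_csvPhonemesToBitstring : Prop := ∀ (csvStr : String) (phonemeList : List String), Dom_csvPhonemesToBitstring csvStr phonemeList → Spec_csvPhonemesToBitstring csvStr phonemeList (csvPhonemesToBitstring csvStr phonemeList)

-- ===== LEMMAS AND PROOFS =====

-- every index produced by enumerate is at least its start value
theorem pv_enum_fst_le (xs : List String) (s : Int) :
    ∀ ip ∈ PySem.List.enumerate xs s, s ≤ ip.1 := by
  induction xs generalizing s with
  | nil => simp [PySem.List.enumerate_nil]
  | cons x xs ih =>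
    intro ip hip
    rw [PySem.List.enumerate_cons] at hip
    rcases List.mem_cons.mp hip with rfl | h
    · exact le_refl s
    · have := ih (s + 1) ip h
      omega

-- one token's marking pass preserves the length of the bit list
theorem pv_len_token (t : String) (l : List (Int × String)) (bs : List String) :
    (l.foldl (fun bs ip => if ip.2 == t then PySem.List.pySetD bs ip.1 "1" else bs) bs).length
      = bs.length := by
  induction l generalizing bs with
  | nil => rfl
  | cons ip l ih =>
    rw [List.foldl_cons]
    cases h : ip.2 == t with
    | false =>
      simp only [Bool.false_eq_true, if_false]
      exact ih bs
    | true =>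
      rw [if_pos rfl, ih, PySem.List.length_pySetD]

-- value at j after one token's marking pass (all indices nonnegative)
theorem pv_get_token (t : String) (l : List (Int × String)) (bs : List String) (j : Nat)
    (hpos : ∀ ip ∈ l, 0 ≤ ip.1) (hj : j < bs.length) :
    (l.foldl (fun bs ip => if ip.2 == t then PySem.List.pySetD bs ip.1 "1" else bs) bs)[j]?
      = if l.any (fun ip => ip.1 == (j : Int) && ip.2 == t) then some "1" else bs[j]? := by
  induction l generalizing bs with
  | nil => simp
  | cons ip l ih =>
    have h0 : (0:Int) ≤ ip.1 := hpos ip (by simp)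
    rw [List.foldl_cons]
    cases hts : ip.2 == t with
    | false =>
      simp only [Bool.false_eq_true, if_false]
      rw [ih _ (fun ip hip => hpos ip (by simp [hip])) hj]
      simp [hts]
    | true =>
      rw [if_pos rfl]
      rw [ih _ (fun ip hip => hpos ip (by simp [hip]))
        (by rw [PySem.List.length_pySetD]; exact hj)]
      rw [PySem.List.pySetD_of_nonneg _ _ h0]
      by_cases hmem : l.any (fun ip => ip.1 == (j : Int) && ip.2 == t)
      · simp [hmem, hts]
      · by_cases hji : ip.1 = (j : Int)
        · have hnat : ip.1.toNat = j := by omega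
          simp [hmem, hts, hji, List.getElem?_set, hnat, hj]
        · have hnat : ip.1.toNat ≠ j := by omega
          simp [hmem, hts, hji, List.getElem?_set, hnat]

-- the fold over the distinct tokens preserves the length of the bit list
theorem pv_len_outer (ts : List String) (pl : List String) (bs : List String) :
    (ts.foldl (fun bs t => (PySem.List.enumerate pl 0).foldl
        (fun bs ip => if ip.2 == t then PySem.List.pySetD bs ip.1 "1" else bs) bs) bs).length
      = bs.length := by
  induction ts generalizing bs with
  | nil => rfl
  | cons t ts ih => rw [List.foldl_cons, ih, pv_len_token]

-- value at j after the fold over the distinct tokens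
theorem pv_get_outer (ts : List String) (pl : List String) (bs : List String) (j : Nat)
    (hj : j < bs.length) :
    (ts.foldl (fun bs t => (PySem.List.enumerate pl 0).foldl
        (fun bs ip => if ip.2 == t then PySem.List.pySetD bs ip.1 "1" else bs) bs) bs)[j]?
      = if ts.any (fun t => (PySem.List.enumerate pl 0).any
            (fun ip => ip.1 == (j : Int) && ip.2 == t))
        then some "1" else bs[j]? := by
  induction ts generalizing bs with
  | nil => simp
  | cons t ts ih =>
    rw [List.foldl_cons, ih _ (by rw [pv_len_token]; exact hj)]
    rw [pv_get_token t _ _ j (fun ip hip => pv_enum_fst_le pl 0 ip hip) hj]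
    by_cases h1 : ts.any (fun t => (PySem.List.enumerate pl 0).any
        (fun ip => ip.1 == (j : Int) && ip.2 == t)) = true
    · simp [h1]
    · by_cases h2 : (PySem.List.enumerate pl 0).any
          (fun ip => ip.1 == (j : Int) && ip.2 == t) = true
      · simp [h1, h2]
      · simp [h1, h2]

-- the marking condition for one token, read off enumerate
theorem pv_any_enum (xs : List String) (s : Int) (t : String) (j : Int) :
    (PySem.List.enumerate xs s).any (fun ip => ip.1 == j && ip.2 == t) = true
      ↔ ∃ k : Nat, k < xs.length ∧ xs[k]? = some t ∧ j = s + k := by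
  induction xs generalizing s with
  | nil => simp [PySem.List.enumerate_nil]
  | cons x xs ih =>
    rw [PySem.List.enumerate_cons, List.any_cons]
    simp only [Bool.or_eq_true, ih]
    constructor
    · rintro (h | ⟨k, hk, hget, rfl⟩)
      · have hst : s = j ∧ x = t := by simpa using h
        exact ⟨0, by simp, by simp [hst.2], by simp [hst.1]⟩
      · exact ⟨k + 1, by simpa using hk, by simpa using hget, by push_cast; ring⟩
    · rintro ⟨k, hk, hget, rfl⟩
      cases k with
      | zero =>
        left
        simp only [List.getElem?_cons_zero, Option.some_inj] at hget
        simp [hget]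
      | succ k =>
        right
        exact ⟨k, by simpa using hk, by simpa using hget, by push_cast; ring⟩

theorem pv_bits_eq (csvList phonemeList : List String) :
    phonemeList.map (fun phoneme => if csvList.contains phoneme then "1" else "0")
      = (PySem.Set.ofList csvList).foldl (fun bs t =>
          (PySem.List.enumerate phonemeList 0).foldl
            (fun bs ip => if ip.2 == t then PySem.List.pySetD bs ip.1 "1" else bs) bs)
          (List.replicate phonemeList.length "0") := by
  apply List.ext_getElem?
  intro j
  by_cases hj : j < phonemeList.length
  · rw [pv_get_outer _ _ _ j (by simpa using hj)]
    have hjget : phonemeList[j]? = some phonemeList[j] := List.getElem?_eq_getElem hj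
    have hEx : (PySem.Set.ofList csvList).any (fun t => (PySem.List.enumerate phonemeList 0).any
          (fun ip => ip.1 == (j : Int) && ip.2 == t)) = true
        ↔ phonemeList[j] ∈ csvList := by
      rw [List.any_eq_true]
      constructor
      · rintro ⟨t, htmem, hany⟩
        rcases (pv_any_enum _ _ _ _).mp hany with ⟨k, hk, hget, hjk⟩
        have hkj : k = j := by omega
        subst hkj
        have ht : t = phonemeList[k] := by
          rw [hjget] at hget; exact (Option.some_inj.mp hget).symm
        subst ht
        exact (PySem.Set.mem_ofList _ _).mp htmem
      · intro hmem
        refine ⟨phonemeList[j], (PySem.Set.mem_ofList _ _).mpr hmem, ?_⟩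
        exact (pv_any_enum _ _ _ _).mpr ⟨j, hj, hjget, by simp⟩
    by_cases hc : phonemeList[j] ∈ csvList
    · have hcb : csvList.contains phonemeList[j] = true := by simpa using hc
      rw [if_pos (hEx.mpr hc), List.getElem?_map, hjget, Option.map_some]
      simp [hcb, hc]
    · have hcb : csvList.contains phonemeList[j] = false := by simpa using hc
      rw [if_neg (fun hx => hc (hEx.mp hx)), List.getElem?_map, hjget, Option.map_some]
      simp [hcb, hc, hj]
  · have h1 : (phonemeList.map
        (fun phoneme => if csvList.contains phoneme then "1" else "0"))[j]? = none := by
      simp [List.getElem?_eq_none_iff]; omega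
    have h2 : ((PySem.Set.ofList csvList).foldl (fun bs t =>
        (PySem.List.enumerate phonemeList 0).foldl
          (fun bs ip => if ip.2 == t then PySem.List.pySetD bs ip.1 "1" else bs) bs)
        (List.replicate phonemeList.length "0")).length = phonemeList.length := by
      rw [pv_len_outer, List.length_replicate]
    rw [h1, List.getElem?_eq_none_iff.mpr (by omega)]

theorem csvPhonemesToBitstring_spec_aux (csvStr : String) (phonemeList : List String) :
    csvPhonemesToBitstring csvStr phonemeList = csvPhonemesToBitstring_alt csvStr phonemeList := by
  simp only [csvPhonemesToBitstring, csvPhonemesToBitstring_alt]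
  rw [PySem.List.foldl_append_singleton_eq_map]
  rw [List.nil_append, pv_bits_eq]

-- ===== VERDICT (by name: the statement is the Claim_ definition above) =====
theorem csvPhonemesToBitstring_spec : Claim_equal_csvPhonemesToBitstring := by
  intro csvStr phonemeList _
  exact csvPhonemesToBitstring_spec_aux csvStr phonemeList
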